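-- pv_equiv track=rewrite | github.com/Burbon13/LFTC | src/analyzer.py | get_atoms_recursive
-- ===== SOURCE A (Python) =====
-- def get_atoms_recursive(text, line_number, separator_list):
--     """
--     Splits the text based on the separators
--     :param text: the text to be splitter
--     :param line_number: the number of the line from the file
--     :param separator_list: the separators which decide the separation
--     :return: a list with the splited tokens
--     """
--     text = text.strip()
--
--     if text == '':
--         return ['']
--
--     if text in separator_list:
--         return [text]
--
--     for separator in separator_list:
--         if separator in text:
--             to_return = []
--             token_lists_list = [get_atoms_recursive(token, line_number, separator_list) for token in
--                                 text.split(separator)]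
--             for token_list in token_lists_list:
--                 for token in token_list:
--                     to_return.append(token)
--                 to_return.append(separator)
--
--             return to_return[:-1]
--
--     return [text]
-- ===== SOURCE B (Python) =====
-- def get_atoms_recursive(text, line_number, separator_list):
--     """Iterative re-implementation: explicit work stack (DFS) instead of recursion."""
--     result = []
--     stack = [("seg", text)]
--     while stack:
--         kind, s = stack.pop()
--         if kind == "emit":
--             result.append(s)
--             continue
--         t = s.strip()
--         if t == '':
--             result.append('')
--         elif t in separator_list:
--             result.append(t)
--         else:
--             sep = next((x for x in separator_list if x in t), None)
--             if sep is None: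
--                 result.append(t)
--             else:
--                 items = []
--                 for piece in t.split(sep):
--                     items.append(("seg", piece))
--                     items.append(("emit", sep))
--                 items.pop()  # no separator after the last piece
--                 stack.extend(reversed(items))
--     return result
-- ===== Notes on version B (the rewrite author's own statement) =====
-- stated objective: alternative
-- what changed: Replaces A's recursion (one recursive call per split piece, appending a separator after each piece's tokens and slicing off the last) with an iterative DFS: an explicit work stack of seg/emit items whose loop emits the same post-order token stream, scheduling each split's pieces interleaved with the separator.
-- outside the precondition, e.g. on get_atoms_recursive('aa', 0, ['a', '']): A returns ['', 'a', '', 'a', ''], B returns ['', 'a', '', 'a', '']; on get_atoms_recursive('ab', 0, ['']): A raises ValueError, B raises ValueError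
import Mathlib
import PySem

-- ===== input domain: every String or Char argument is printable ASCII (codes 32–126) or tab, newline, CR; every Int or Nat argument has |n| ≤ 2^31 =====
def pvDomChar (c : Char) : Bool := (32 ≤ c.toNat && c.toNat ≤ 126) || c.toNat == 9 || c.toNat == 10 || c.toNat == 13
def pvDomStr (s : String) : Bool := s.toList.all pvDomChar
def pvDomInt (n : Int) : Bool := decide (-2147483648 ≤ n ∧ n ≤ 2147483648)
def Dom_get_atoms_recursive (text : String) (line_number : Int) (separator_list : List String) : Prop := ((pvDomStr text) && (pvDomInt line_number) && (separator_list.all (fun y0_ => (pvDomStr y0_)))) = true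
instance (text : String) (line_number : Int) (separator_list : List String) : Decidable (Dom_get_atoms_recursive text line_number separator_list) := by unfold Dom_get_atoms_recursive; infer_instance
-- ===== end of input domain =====

-- B re-implements A's recursive tokenizer as an iterative DFS over an explicit work stack
-- (objective: alternative — same cost, no recursion). Equivalence of the RETURN values is
-- proved on Pre_ (separator lists without the empty string, on which Python's split raises).

-- ===== PORT A =====
-- Literal port of A's recursion; the fuel only makes the recursion total (it is never
-- exhausted when "" is not a separator, see gaRec_fuel below). A's
-- 'for separator in separator_list: if separator in text: … return' is ported as find? of
-- the first separator contained in the text, followed by the loop body that returns.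
def gaRec (line_number : Int) (separator_list : List String) : Nat → String → List String
  | 0, _ => []        -- fuel exhausted (unreachable at the fuel chosen below)
  | fuel + 1, text0 =>
    let text := PySem.Str.strip text0
    if text = "" then [""]
    else if text ∈ separator_list then [text]
    else
      match separator_list.find? (fun sep => PySem.Str.isIn sep text) with
      | none => [text]
      | some separator =>
        match PySem.Str.split? text separator with
        | none => []   -- text.split('') raises ValueError in Python; excluded by Pre_
        | some toks =>
          let token_lists_list := toks.map (fun token => gaRec line_number separator_list fuel token)
          let to_return := token_lists_list.foldl
            (fun to_return token_list =>
              (token_list.foldl (fun acc token => acc ++ [token]) to_return) ++ [separator]) []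
          to_return.dropLast

def get_atoms_recursive (text : String) (line_number : Int) (separator_list : List String) : List String :=
  gaRec line_number separator_list (text.toList.length + 1) text

-- ===== PORT B =====
-- work items of B's explicit stack: a segment still to be tokenized, or a token to emit
inductive PvItem where
  | seg : String → PvItem
  | emit : String → PvItem

-- B's 'for piece in pieces: items += [seg piece, emit sep]' followed by 'items.pop()'
def pvSchedule (pieces : List String) (sep : String) : List PvItem :=
  match pieces with
  | [] => []
  | [p] => [PvItem.seg p]
  | p :: q :: rest => PvItem.seg p :: PvItem.emit sep :: pvSchedule (q :: rest) sep

-- B's while-loop; the fuel only makes the loop total (never exhausted at the fuel chosen below)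
def pvLoop (separator_list : List String) : Nat → List PvItem → List String → List String
  | _, [], result => result
  | 0, _, result => result      -- fuel exhausted (unreachable)
  | fuel + 1, item :: stack, result =>
    match item with
    | PvItem.emit s => pvLoop separator_list fuel stack (result ++ [s])
    | PvItem.seg s =>
      let t := PySem.Str.strip s
      if t = "" then pvLoop separator_list fuel stack (result ++ [""])
      else if t ∈ separator_list then pvLoop separator_list fuel stack (result ++ [t])
      else
        match separator_list.find? (fun x => PySem.Str.isIn x t) with
        | none => pvLoop separator_list fuel stack (result ++ [t])
        | some sep =>
          match PySem.Str.split? t sep with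
          | none => []   -- t.split('') raises ValueError in Python; excluded by Pre_
          | some pieces => pvLoop separator_list fuel (pvSchedule pieces sep ++ stack) result

def get_atoms_recursive_alt (text : String) (line_number : Int) (separator_list : List String) : List String :=
  pvLoop separator_list (3 * text.toList.length + 1) [PvItem.seg text] []

-- ===== PRECONDITION & SPEC =====
-- Pre_ excludes separator lists containing the empty string except when the stripped text
-- is empty or itself a separator: on the excluded inputs Python's text.split('') raises
-- ValueError at some recursion level unless every reached piece happens to be degenerate
-- (A then returns, and B returns the same value there).
def Pre_get_atoms_recursive (text : String) (line_number : Int) (separator_list : List String) : Prop :=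
  "" ∉ separator_list ∨ PySem.Str.strip text = "" ∨ PySem.Str.strip text ∈ separator_list
instance (text : String) (line_number : Int) (separator_list : List String) : Decidable (Pre_get_atoms_recursive text line_number separator_list) := by unfold Pre_get_atoms_recursive; infer_instance

def pvWitness_get_atoms_recursive : String × Int × List String := ("a+b", 7, ["+"])

def Spec_get_atoms_recursive (text : String) (line_number : Int) (separator_list : List String) (out : List String) : Prop := out = get_atoms_recursive_alt text line_number separator_list
instance (text : String) (line_number : Int) (separator_list : List String) (out : List String) : Decidable (Spec_get_atoms_recursive text line_number separator_list out) := by unfold Spec_get_atoms_recursive; infer_instance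

-- ===== CLAIM (what is proved, stated in full; the proofs are below) =====
def Claim_equal_get_atoms_recursive : Prop := ∀ (text : String) (line_number : Int) (separator_list : List String), Dom_get_atoms_recursive text line_number separator_list → Pre_get_atoms_recursive text line_number separator_list → Spec_get_atoms_recursive text line_number separator_list (get_atoms_recursive text line_number separator_list)

-- ===== LEMMAS AND PROOFS =====

lemma pv_strip_len (s : String) : (PySem.Str.strip s).toList.length ≤ s.toList.length := by
  rw [PySem.Str.toList_strip]
  unfold PySem.Chars.strip PySem.Chars.rstrip PySem.Chars.lstrip
  rw [List.length_reverse]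
  refine le_trans (List.length_dropWhile_le _ _) ?_
  rw [List.length_reverse]
  exact List.length_dropWhile_le _ _

lemma pv_go_len (sep : List Char) : ∀ (fuel : Nat) (l cur : List Char) (acc : List (List Char)),
    acc.length + 1 ≤ (PySem.Chars.splitOn.go sep fuel l cur acc).length := by
  intro fuel
  induction fuel with
  | zero => intro l cur acc; simp [PySem.Chars.splitOn.go]
  | succ f ih =>
    intro l cur acc
    cases l with
    | nil => simp [PySem.Chars.splitOn.go]
    | cons c rest =>
      rw [PySem.Chars.splitOn.go]
      split
      · have := ih (List.drop sep.length (c :: rest)) [] (cur.reverse :: acc)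
        simp at this ⊢; omega
      · exact ih _ _ _

lemma pv_go_sum (sep : List Char) (hsep : sep ≠ []) :
    ∀ (fuel : Nat) (l cur : List Char) (acc : List (List Char)), l.length < fuel →
    ((PySem.Chars.splitOn.go sep fuel l cur acc).map List.length).sum
      + ((PySem.Chars.splitOn.go sep fuel l cur acc).length - 1) * sep.length
    = ((acc.map List.length).sum + acc.length * sep.length) + cur.length + l.length := by
  intro fuel
  induction fuel with
  | zero => intro l cur acc h; omega
  | succ f ih =>
    intro l cur acc h
    cases l with
    | nil =>
      simp [PySem.Chars.splitOn.go]
      ring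
    | cons c rest =>
      rw [PySem.Chars.splitOn.go]
      split
      · next hpre =>
        have hp : sep <+: (c :: rest) := List.isPrefixOf_iff_prefix.mp hpre
        have hslen : sep.length ≤ (c :: rest).length := List.IsPrefix.length_le hp
        have hone : 1 ≤ sep.length := by
          cases sep with | nil => exact absurd rfl hsep | cons a b => simp
        simp only [List.length_cons] at h hslen
        have := ih (List.drop sep.length (c :: rest)) [] (cur.reverse :: acc)
          (by simp only [List.length_drop, List.length_cons]; omega)
        rw [List.length_cons, Nat.succ_mul] at this
        simp only [List.length_drop, List.length_cons, List.map_cons, List.sum_cons,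
          List.length_reverse, List.length_nil, List.length_cons] at this ⊢
        omega
      · have := ih rest (c :: cur) acc (by simp at h ⊢; omega)
        simp at this ⊢
        omega

lemma pv_go_two (sep : List Char) (hsep : sep ≠ []) :
    ∀ (fuel : Nat) (l cur : List Char) (acc : List (List Char)), l.length < fuel →
    sep <:+: l → acc.length + 2 ≤ (PySem.Chars.splitOn.go sep fuel l cur acc).length := by
  intro fuel
  induction fuel with
  | zero => intro l cur acc h; omega
  | succ f ih =>
    intro l cur acc h hin
    cases l with
    | nil =>
      exact absurd (List.eq_nil_of_infix_nil hin) hsep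
    | cons c rest =>
      rw [PySem.Chars.splitOn.go]
      split
      · have := pv_go_len sep f (List.drop sep.length (c :: rest)) [] (cur.reverse :: acc)
        simp at this ⊢; omega
      · next hnp =>
        have : sep <:+: rest := by
          rcases (List.infix_cons_iff.mp hin) with h1 | h2
          · exact absurd (List.isPrefixOf_iff_prefix.mpr h1) (by simpa using hnp)
          · exact h2
        have := ih rest (c :: cur) acc (by simp at h ⊢; omega) this
        exact this

lemma pv_splitOn_sum (s sep : List Char) (hsep : sep ≠ []) :
    ((PySem.Chars.splitOn s sep).map List.length).sum
      + ((PySem.Chars.splitOn s sep).length - 1) * sep.length = s.length := by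
  simpa using pv_go_sum sep hsep (s.length + 1) s [] [] (Nat.lt_succ_self _)

lemma pv_splitOn_two (s sep : List Char) (hsep : sep ≠ []) (h : sep <:+: s) :
    2 ≤ (PySem.Chars.splitOn s sep).length := by
  simpa using pv_go_two sep hsep (s.length + 1) s [] [] (Nat.lt_succ_self _) h

lemma pv_split?_eq (t sep : String) (hsep : sep ≠ "") :
    PySem.Str.split? t sep = some ((PySem.Chars.splitOn t.toList sep.toList).map String.ofList) := by
  simp [PySem.Str.split?, PySem.Chars.split?, String.toList_eq_nil_iff, hsep]

lemma pv_pieces_facts (t sep : String) (hsep : sep ≠ "") (hin : PySem.Str.isIn sep t = true)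
    (pieces : List String) (hsp : PySem.Str.split? t sep = some pieces) :
    3 * (pieces.map (fun p => p.toList.length)).sum + 2 * pieces.length ≤ 3 * t.toList.length + 1
      ∧ 2 ≤ pieces.length ∧ ∀ p ∈ pieces, p.toList.length < t.toList.length := by
  rw [pv_split?_eq t sep hsep] at hsp
  have hpieces := (Option.some_injective _ hsp).symm
  have hsepl : sep.toList ≠ [] := by
    intro h; exact hsep (by simpa [String.toList_eq_nil_iff] using h)
  have hinf : sep.toList <:+: t.toList := (PySem.Str.isIn_iff_infix sep t).mp hin
  have hsum := pv_splitOn_sum t.toList sep.toList hsepl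
  have htwo := pv_splitOn_two t.toList sep.toList hsepl hinf
  have hmaps : pieces.map (fun p => p.toList.length) = (PySem.Chars.splitOn t.toList sep.toList).map List.length := by
    rw [hpieces, List.map_map]
    simp [Function.comp_def]
  have hlen : pieces.length = (PySem.Chars.splitOn t.toList sep.toList).length := by
    rw [hpieces, List.length_map]
  have hS : 1 ≤ sep.toList.length := by
    cases h : sep.toList with
    | nil => exact absurd h hsepl
    | cons a b => simp
  have hmul : (pieces.length - 1) * 1 ≤ ((PySem.Chars.splitOn t.toList sep.toList).length - 1) * sep.toList.length := by
    rw [hlen]; exact Nat.mul_le_mul_left _ hS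
  refine ⟨?_, by omega, ?_⟩
  · rw [hmaps]; omega
  · intro p hp
    have h1 : p.toList.length ∈ pieces.map (fun p => p.toList.length) := List.mem_map_of_mem hp
    have h2 : p.toList.length ≤ (pieces.map (fun p => p.toList.length)).sum := List.le_sum_of_mem h1
    rw [hmaps] at h2
    omega

lemma pv_find?_facts (seps : List String) (t sep : String) (hpre : "" ∉ seps)
    (h : seps.find? (fun x => PySem.Str.isIn x t) = some sep) :
    sep ≠ "" ∧ PySem.Str.isIn sep t = true := by
  constructor
  · intro he; exact hpre (he ▸ List.mem_of_find?_eq_some h)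
  · simpa using List.find?_some h

lemma gaRec_fuel (ln : Int) (seps : List String) (hpre : "" ∉ seps) :
    ∀ (n f g : Nat) (text : String), text.toList.length ≤ n →
    text.toList.length < f → text.toList.length < g →
    gaRec ln seps f text = gaRec ln seps g text := by
  intro n
  induction n using Nat.strong_induction_on with
  | _ n ih =>
    intro f g text hn hf hg
    match f, g with
    | f' + 1, g' + 1 =>
      rw [gaRec, gaRec]
      simp only
      by_cases ht : PySem.Str.strip text = ""
      · simp [ht]
      · simp only [ht, if_false]
        by_cases hmem : PySem.Str.strip text ∈ seps
        · simp [hmem]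
        · simp only [hmem, if_false]
          cases hfind : seps.find? (fun x => PySem.Str.isIn x (PySem.Str.strip text)) with
          | none => simp
          | some sep =>
            simp only
            obtain ⟨hsep, hin⟩ := pv_find?_facts seps _ sep hpre hfind
            cases hsp : PySem.Str.split? (PySem.Str.strip text) sep with
            | none => simp
            | some toks =>
              simp only
              have hfacts := pv_pieces_facts _ sep hsep hin toks hsp
              have hstrip := pv_strip_len text
              have hmapeq : toks.map (fun token => gaRec ln seps f' token)
                  = toks.map (fun token => gaRec ln seps g' token) := by
                apply List.map_congr_left
                intro token htok
                have hlt := hfacts.2.2 token htok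
                exact ih token.toList.length (by omega) f' g' token (le_refl _) (by omega) (by omega)
              rw [hmapeq]

-- the meaning of a work item: what A produces for it
def pvDenote (ln : Int) (seps : List String) : PvItem → List String
  | PvItem.emit t => [t]
  | PvItem.seg s => gaRec ln seps (s.toList.length + 1) s

-- fuel weight of a stack
def pvW : List PvItem → Nat
  | [] => 0
  | PvItem.emit _ :: rest => 1 + pvW rest
  | PvItem.seg s :: rest => (3 * s.toList.length + 1) + pvW rest

lemma pvW_append (a b : List PvItem) : pvW (a ++ b) = pvW a + pvW b := by
  induction a with
  | nil => simp [pvW]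
  | cons x xs ih => cases x <;> simp [pvW, ih] <;> omega

lemma pvW_schedule (pieces : List String) (sep : String) (hne : pieces ≠ []) :
    pvW (pvSchedule pieces sep) + 1 ≤ 3 * (pieces.map (fun p => p.toList.length)).sum + 2 * pieces.length := by
  induction pieces with
  | nil => exact absurd rfl hne
  | cons p tl ih =>
    cases tl with
    | nil => simp [pvSchedule, pvW]
    | cons q rest =>
      rw [pvSchedule]
      have ih' := ih (by simp)
      simp only [pvW, List.map_cons, List.sum_cons, List.length_cons] at ih' ⊢
      omega

lemma pv_flatMap_nonempty (sep : String) (Xs : List (List String)) (h : Xs ≠ []) :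
    (Xs.flatMap (fun x => x ++ [sep])) ≠ [] := by
  cases Xs with
  | nil => exact absurd rfl h
  | cons a b => simp [List.flatMap]

lemma pv_flatMap_schedule (ln : Int) (seps : List String) (sep : String) :
    ∀ (pieces : List String), pieces ≠ [] →
    (pvSchedule pieces sep).flatMap (pvDenote ln seps)
      = ((pieces.map (fun p => pvDenote ln seps (PvItem.seg p))).flatMap (fun x => x ++ [sep])).dropLast := by
  intro pieces
  induction pieces with
  | nil => intro h; exact absurd rfl h
  | cons p tl ih =>
    intro _
    cases tl with
    | nil => simp [pvSchedule, pvDenote]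
    | cons q rest =>
      rw [pvSchedule]
      have hne : ((List.map (fun p => pvDenote ln seps (PvItem.seg p)) (q :: rest)).flatMap (fun x => x ++ [sep])) ≠ [] :=
        pv_flatMap_nonempty sep _ (by simp)
      simp only [List.map_cons, List.flatMap_cons]
      rw [List.dropLast_append_of_ne_nil (by simp), ih (by simp)]
      simp [pvDenote, List.append_assoc]

lemma pvLoop_spec (ln : Int) (seps : List String) (hpre : "" ∉ seps) :
    ∀ (fuel : Nat) (stack : List PvItem) (acc : List String), pvW stack ≤ fuel →
    pvLoop seps fuel stack acc = acc ++ stack.flatMap (pvDenote ln seps) := by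
  intro fuel
  induction fuel using Nat.strong_induction_on with
  | _ fuel ih =>
    intro stack acc hW
    cases stack with
    | nil => cases fuel <;> simp [pvLoop]
    | cons item rest =>
      match fuel with
      | 0 => exfalso; cases item <;> (simp [pvW] at hW)
      | f + 1 =>
        cases item with
        | emit s =>
          rw [pvLoop, ih f (by omega) rest (acc ++ [s]) (by simp [pvW] at hW; omega)]
          simp [pvDenote]
        | seg s =>
          rw [pvLoop]
          have hWs : 3 * s.toList.length + 1 + pvW rest ≤ f + 1 := by simpa [pvW] using hW
          by_cases ht : PySem.Str.strip s = ""
          · rw [if_pos ht, ih f (by omega) rest (acc ++ [""]) (by omega)]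
            have : pvDenote ln seps (PvItem.seg s) = [""] := by
              simp [pvDenote, gaRec, ht]
            simp [this]
          · rw [if_neg ht]
            by_cases hmem : PySem.Str.strip s ∈ seps
            · rw [if_pos hmem, ih f (by omega) rest _ (by omega)]
              have : pvDenote ln seps (PvItem.seg s) = [PySem.Str.strip s] := by
                simp [pvDenote, gaRec, ht, hmem]
              simp [this]
            · rw [if_neg hmem]
              cases hfind : seps.find? (fun x => PySem.Str.isIn x (PySem.Str.strip s)) with
              | none =>
                simp only
                rw [ih f (by omega) rest _ (by omega)]
                have : pvDenote ln seps (PvItem.seg s) = [PySem.Str.strip s] := by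
                  rw [pvDenote, gaRec]
                  simp only [if_neg ht, if_neg hmem, hfind]
                simp [this]
              | some sep =>
                simp only
                obtain ⟨hsep, hin⟩ := pv_find?_facts seps _ sep hpre hfind
                cases hsp : PySem.Str.split? (PySem.Str.strip s) sep with
                | none =>
                  exact absurd (pv_split?_eq _ sep hsep ▸ hsp) (by simp)
                | some pieces =>
                  simp only
                  obtain ⟨hsum, htwo, hlt⟩ := pv_pieces_facts _ sep hsep hin pieces hsp
                  have hstrip := pv_strip_len s
                  have hWsch : pvW (pvSchedule pieces sep) ≤ 3 * s.toList.length := by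
                    have := pvW_schedule pieces sep (by intro h; subst h; simp at htwo)
                    omega
                  rw [ih f (by omega) (pvSchedule pieces sep ++ rest) acc
                    (by rw [pvW_append]; omega)]
                  rw [List.flatMap_append, List.flatMap_cons]
                  rw [pv_flatMap_schedule ln seps sep pieces (by intro h; subst h; simp at htwo)]
                  have hden : pvDenote ln seps (PvItem.seg s)
                      = ((pieces.map (fun p => pvDenote ln seps (PvItem.seg p))).flatMap (fun x => x ++ [sep])).dropLast := by
                    rw [pvDenote]
                    rw [gaRec]
                    simp only [ht, if_false, hmem, if_false, hfind, hsp]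
                    have hmapeq : pieces.map (fun token => gaRec ln seps s.toList.length token)
                        = pieces.map (fun p => pvDenote ln seps (PvItem.seg p)) := by
                      apply List.map_congr_left
                      intro token htok
                      have := hlt token htok
                      exact gaRec_fuel ln seps hpre token.toList.length s.toList.length (token.toList.length + 1)
                        token (le_refl _) (by omega) (by omega)
                    rw [hmapeq]
                    simp only [PySem.List.foldl_append_singleton, List.append_assoc]
                    rw [PySem.List.foldl_append_eq_flatMap]
                    simp
                  rw [hden]

-- ===== VERDICT (by name: the statement is the Claim_ definition above) =====
lemma pvLoop_nil (seps : List String) (f : Nat) (acc : List String) :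
    pvLoop seps f [] acc = acc := by
  cases f <;> rfl

theorem get_atoms_recursive_spec : Claim_equal_get_atoms_recursive := by
  intro text ln seps _hdom hpre
  unfold Spec_get_atoms_recursive get_atoms_recursive get_atoms_recursive_alt
  by_cases hnp : "" ∉ seps
  · rw [pvLoop_spec ln seps hnp _ _ _ (by simp [pvW])]
    simp [pvDenote, List.flatMap]
  · -- "" is a separator but the input is degenerate: both return in their first step
    have hdeg : PySem.Str.strip text = "" ∨ PySem.Str.strip text ∈ seps := by
      unfold Pre_get_atoms_recursive at hpre; tauto
    rw [gaRec, pvLoop]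
    by_cases ht : PySem.Str.strip text = ""
    · simp only [ht, pvLoop_nil]
      simp
    · have hmem : PySem.Str.strip text ∈ seps := hdeg.resolve_left ht
      simp only [if_neg ht, if_pos hmem, pvLoop_nil]
      simp
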